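-- pv_equiv track=rewrite | github.com/Mamut010/word-game | gen/word-search-gen.py | words_to_formatted_2d
-- ===== SOURCE A (Python) =====
-- def words_to_formatted_2d(words: list[str], n_words_per_row: int,\
--                                   word_justified_length: int, display: bool|None = None):
--     '''Convert words list to a formatted string of 2d array'''
--     word_rows = list[list[str]]()
--     displayed_word_rows = list[list[str]]()
--     n_words = len(words)
--     n_inserted_words = 0
--     while n_inserted_words < n_words:
--         n_row_words = min(n_words - n_inserted_words, n_words_per_row)
--         inserted_words = words[n_inserted_words : n_inserted_words+n_row_words]
--         row = [f"'{word}'".ljust(word_justified_length + 2) for word in inserted_words]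
--         word_rows.append(row)
--         if display:
--             displayed_row = [word.ljust(word_justified_length) for word in inserted_words]
--             displayed_word_rows.append(displayed_row)
--         n_inserted_words += n_row_words
--     formatted_words = ",\n".join(", ".join(row) for row in word_rows) + ","
--     displayed_words = "\n".join("      ".join(row) for row in displayed_word_rows) if display else ''
--     return (formatted_words, displayed_words)
-- ===== SOURCE B (Python) =====
-- def words_to_formatted_2d(words: list[str], n_words_per_row: int,
--                           word_justified_length: int, display: bool | None = None):
--     '''Convert words list to a formatted string of 2d array'''
--     formatted = []
--     displayed = []
--     for i, word in enumerate(words):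
--         if i == 0:
--             sep, dsep = '', ''
--         elif i % n_words_per_row == 0:
--             sep, dsep = ',\n', '\n'
--         else:
--             sep, dsep = ', ', '      '
--         formatted.append(sep + f"'{word}'".ljust(word_justified_length + 2))
--         if display:
--             displayed.append(dsep + word.ljust(word_justified_length))
--     formatted_words = ''.join(formatted) + ','
--     displayed_words = ''.join(displayed) if display else ''
--     return (formatted_words, displayed_words)
-- ===== Notes on version B (the rewrite author's own statement) =====
-- stated objective: simpler
-- what changed: Replaces A's build-nested-row-lists-then-double-join structure with a single enumerate pass that picks each token's leading separator ('', ',\n'/'\n', or ', '/six spaces) from its index modulo n_words_per_row and concatenates directly.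
import Mathlib
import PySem

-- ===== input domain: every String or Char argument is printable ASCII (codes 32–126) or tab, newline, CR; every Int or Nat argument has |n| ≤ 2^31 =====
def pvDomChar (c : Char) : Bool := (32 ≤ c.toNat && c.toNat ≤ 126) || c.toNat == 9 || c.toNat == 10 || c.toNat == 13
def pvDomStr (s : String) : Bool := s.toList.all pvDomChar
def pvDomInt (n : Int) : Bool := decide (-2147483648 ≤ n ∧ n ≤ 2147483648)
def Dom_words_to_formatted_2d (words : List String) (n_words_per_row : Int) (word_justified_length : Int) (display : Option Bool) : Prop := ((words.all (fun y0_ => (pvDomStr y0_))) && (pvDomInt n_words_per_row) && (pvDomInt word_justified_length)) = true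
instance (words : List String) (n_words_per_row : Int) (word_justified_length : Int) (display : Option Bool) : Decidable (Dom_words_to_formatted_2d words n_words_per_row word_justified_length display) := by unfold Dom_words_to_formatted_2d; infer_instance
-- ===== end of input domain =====

-- B replaces A's build-row-lists-then-double-join structure by one index-driven pass over
-- enumerate(words) that picks each token's leading separator from its index (objective: simpler).

-- ===== PORT A =====
-- str.ljust(w) on code points (PySem has no ljust): pad on the right with spaces to width w; exact.
def pvLjust (cs : List Char) (w : Int) : List Char :=
  cs ++ List.replicate (w.toNat - cs.length) ' '

-- f"'{word}'".ljust(word_justified_length + 2)   (shared subexpression of both Pythons)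
def pvTokQ (wj : Int) (w : String) : List Char :=
  pvLjust ('\'' :: (w.toList ++ ['\''])) (wj + 2)

-- word.ljust(word_justified_length)   (shared subexpression of both Pythons)
def pvTokD (wj : Int) (w : String) : List Char :=
  pvLjust w.toList wj

-- the while-loop of A; fuel = len(words) suffices whenever the Python loop terminates
def pvALoop (words : List String) (n_words npr wj : Int) (disp : Bool) :
    Nat → Int → List (List (List Char)) → List (List (List Char)) →
    List (List (List Char)) × List (List (List Char))
  | 0, _, wr, dwr => (wr, dwr)
  | fuel+1, ins, wr, dwr =>
    if ins < n_words then
      let k := min (n_words - ins) npr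
      let inserted := PySem.List.slice words (some ins) (some (ins + k))
      let row := inserted.map (pvTokQ wj)
      let wr' := wr ++ [row]
      let dwr' := if disp then dwr ++ [inserted.map (pvTokD wj)] else dwr
      pvALoop words n_words npr wj disp fuel (ins + k) wr' dwr'
    else (wr, dwr)

def words_to_formatted_2d (words : List String) (n_words_per_row : Int) (word_justified_length : Int) (display : Option Bool) : String × String :=
  let disp := display == some true
  let p := pvALoop words (words.length : Int) n_words_per_row word_justified_length disp words.length 0 [] []
  let fw := PySem.Chars.join (",\n".toList) (p.1.map (PySem.Chars.join (", ".toList))) ++ [',']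
  let dw := if disp then PySem.Chars.join ("\n".toList) (p.2.map (PySem.Chars.join ("      ".toList))) else []
  (String.ofList fw, String.ofList dw)

-- ===== PORT B =====
def words_to_formatted_2d_alt (words : List String) (n_words_per_row : Int) (word_justified_length : Int) (display : Option Bool) : String × String :=
  let disp := display == some true
  let p := (PySem.List.enumerate words 0).foldl
    (fun acc iw =>
      let sep := if iw.1 = 0 then ([] : List Char)
                 else if PySem.Int.mod iw.1 n_words_per_row = 0 then ",\n".toList
                 else ", ".toList
      let dsep := if iw.1 = 0 then ([] : List Char)
                  else if PySem.Int.mod iw.1 n_words_per_row = 0 then "\n".toList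
                  else "      ".toList
      (acc.1 ++ (sep ++ pvTokQ word_justified_length iw.2),
       if disp then acc.2 ++ (dsep ++ pvTokD word_justified_length iw.2) else acc.2))
    (([] : List Char), ([] : List Char))
  (String.ofList (p.1 ++ [',']), String.ofList (if disp then p.2 else []))

-- ===== PRECONDITION & SPEC =====
-- Pre_ excludes nonempty words with n_words_per_row ≤ 0: there A's while loop makes no progress
-- and never returns (and B's modulo would raise ZeroDivisionError at n_words_per_row = 0).
def Pre_words_to_formatted_2d (words : List String) (n_words_per_row : Int) (word_justified_length : Int) (display : Option Bool) : Prop :=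
  words = [] ∨ 1 ≤ n_words_per_row
instance (words : List String) (n_words_per_row : Int) (word_justified_length : Int) (display : Option Bool) : Decidable (Pre_words_to_formatted_2d words n_words_per_row word_justified_length display) := by unfold Pre_words_to_formatted_2d; infer_instance

def pvWitness_words_to_formatted_2d : List String × Int × Int × Option Bool := (["ab", "c", "def"], 2, 4, some true)

def Spec_words_to_formatted_2d (words : List String) (n_words_per_row : Int) (word_justified_length : Int) (display : Option Bool) (out : String × String) : Prop := out = words_to_formatted_2d_alt words n_words_per_row word_justified_length display
instance (words : List String) (n_words_per_row : Int) (word_justified_length : Int) (display : Option Bool) (out : String × String) : Decidable (Spec_words_to_formatted_2d words n_words_per_row word_justified_length display out) := by unfold Spec_words_to_formatted_2d; infer_instance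

-- ===== CLAIM (what is proved, stated in full; the proofs are below) =====
def Claim_equal_words_to_formatted_2d : Prop := ∀ (words : List String) (n_words_per_row : Int) (word_justified_length : Int) (display : Option Bool), Dom_words_to_formatted_2d words n_words_per_row word_justified_length display → Pre_words_to_formatted_2d words n_words_per_row word_justified_length display → Spec_words_to_formatted_2d words n_words_per_row word_justified_length display (words_to_formatted_2d words n_words_per_row word_justified_length display)

-- ===== LEMMAS AND PROOFS =====

-- words, chunked: first chunk = first k+1 elements, and so on (chunk size k+1 ≥ 1)
def pvChunks (k : Nat) : List String → List (List String)
  | [] => []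
  | w :: ws => (w :: ws.take k) :: pvChunks k (ws.drop k)
termination_by l => l.length
decreasing_by simp

-- one-string model of B's pass: leading separator chosen from the index
def pvGo (npr : Int) (tok : String → List Char) (sZ sI : List Char) :
    List String → Int → List Char
  | [], _ => []
  | w :: ws, i =>
    ((if i = 0 then [] else if PySem.Int.mod i npr = 0 then sZ else sI) ++ tok w)
      ++ pvGo npr tok sZ sI ws (i + 1)

theorem pvJoin_cons (s x : List Char) (xs : List (List Char)) :
    PySem.Chars.join s (x :: xs) = x ++ (xs.map (fun y => s ++ y)).flatten := by
  induction xs generalizing x with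
  | nil => simp [PySem.Chars.join_singleton]
  | cons y ys ih => simp [PySem.Chars.join_cons_cons, ih y]

theorem pvB_fold (npr wj : Int) (disp : Bool) :
    ∀ (ws : List String) (s : Int) (a b : List Char),
    (PySem.List.enumerate ws s).foldl
      (fun acc iw =>
        let sep := if iw.1 = 0 then ([] : List Char)
                   else if PySem.Int.mod iw.1 npr = 0 then ",\n".toList
                   else ", ".toList
        let dsep := if iw.1 = 0 then ([] : List Char)
                    else if PySem.Int.mod iw.1 npr = 0 then "\n".toList
                    else "      ".toList
        (acc.1 ++ (sep ++ pvTokQ wj iw.2),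
         if disp then acc.2 ++ (dsep ++ pvTokD wj iw.2) else acc.2))
      (a, b)
    = (a ++ pvGo npr (pvTokQ wj) (",\n".toList) (", ".toList) ws s,
       b ++ (if disp then pvGo npr (pvTokD wj) ("\n".toList) ("      ".toList) ws s else [])) := by
  intro ws
  induction ws with
  | nil => intro s a b; simp [PySem.List.enumerate_nil, pvGo]
  | cons w ws ih =>
    intro s a b
    rw [PySem.List.enumerate_cons]
    simp only [List.foldl_cons]
    rw [ih]
    cases disp <;> simp [pvGo, List.append_assoc]

-- inside a chunk (no index divisible by npr) pvGo emits the inner separator before every token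
theorem pvGo_inner (npr : Int) (tok : String → List Char) (sZ sI : List Char) :
    ∀ (c : List String) (i : Int) (rest : List String), 0 < i →
    (∀ j : Int, i ≤ j → j < i + c.length → ¬ PySem.Int.mod j npr = 0) →
    pvGo npr tok sZ sI (c ++ rest) i
      = (c.map (fun w => sI ++ tok w)).flatten ++ pvGo npr tok sZ sI rest (i + c.length) := by
  intro c
  induction c with
  | nil => intro i rest _ _; simp [pvGo]
  | cons w cs ih =>
    intro i rest hi hmod
    have h1 : ¬ PySem.Int.mod i npr = 0 :=
      hmod i le_rfl (by simp only [List.length_cons]; omega)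
    have h2 := ih (i + 1) rest (by omega)
      (fun j hj1 hj2 => hmod j (by omega) (by simp only [List.length_cons] at hj2 ⊢; omega))
    have hlen : i + ((w :: cs).length : Int) = (i + 1) + (cs.length : Int) := by
      simp only [List.length_cons]; push_cast; ring
    simp only [List.cons_append, pvGo, if_neg (show ¬ i = 0 by omega), if_neg h1, h2, hlen,
      List.map_cons, List.flatten_cons, List.append_assoc]

theorem pvGo_eq_join (npr : Int) (hnpr : 1 ≤ npr) (tok : String → List Char) (sZ sI : List Char) :
    ∀ (n : Nat) (l : List String), l.length ≤ n → ∀ (q : Nat),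
    pvGo npr tok sZ sI l ((q : Int) * npr)
      = (if q = 0 ∨ l = [] then [] else sZ) ++
        PySem.Chars.join sZ ((pvChunks (npr.toNat - 1) l).map (fun c => PySem.Chars.join sI (c.map tok))) := by
  intro n
  induction n with
  | zero =>
    intro l hl q
    have : l = [] := List.length_eq_zero_iff.mp (by omega)
    subst this
    simp [pvGo, pvChunks, PySem.Chars.join_nil]
  | succ n ih =>
    intro l hl q
    match l with
    | [] => simp [pvGo, pvChunks, PySem.Chars.join_nil]
    | w :: ws =>
      set k := npr.toNat - 1 with hk
      have hknpr : (k : Int) + 1 = npr := by omega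
      have hqnn : (0 : Int) ≤ (q : Int) * npr :=
        mul_nonneg (Int.natCast_nonneg q) (by omega)
      have hsep0 : (if ((q : Int) * npr) = 0 then ([] : List Char)
          else if PySem.Int.mod ((q : Int) * npr) npr = 0 then sZ else sI)
          = (if q = 0 then [] else sZ) := by
        have hdvd : PySem.Int.mod ((q : Int) * npr) npr = 0 := by
          rw [PySem.Int.mod_eq_zero_iff_dvd]; exact Dvd.intro_left q rfl
        rcases Nat.eq_zero_or_pos q with hq | hq
        · simp [hq]
        · have h1 : (1 : Int) ≤ (q : Int) * npr := by
            have : (1 : Int) ≤ (q : Int) := by exact_mod_cast hq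
            nlinarith
          rw [if_neg (by omega), hdvd, if_pos rfl, if_neg (by omega)]
      have hLc : (ws.take k).length ≤ k := by simp
      have hinner := pvGo_inner npr tok sZ sI (ws.take k) ((q : Int) * npr + 1) (ws.drop k)
        (by omega)
        (by
          intro j hj1 hj2
          rw [PySem.Int.mod_eq_emod_of_pos (by omega)]
          have hj : j = (j - (q : Int) * npr) + q * npr := by ring
          rw [hj, Int.add_mul_emod_self_right]
          rw [Int.emod_eq_of_lt (by omega) (by omega)]
          omega)
      have hsplit : pvGo npr tok sZ sI (w :: ws) ((q : Int) * npr)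
          = pvGo npr tok sZ sI (w :: (ws.take k ++ ws.drop k)) ((q : Int) * npr) := by
        simp
      rw [hsplit]
      simp only [pvGo, hsep0]
      rw [hinner]
      rcases eq_or_ne (ws.drop k) [] with hrest | hrestne
      · -- last chunk
        have hchunks : pvChunks k (w :: ws) = [w :: ws.take k] := by
          rw [pvChunks, hrest, pvChunks]
        rw [hrest]
        simp only [pvGo, hchunks, List.map_cons, List.map_nil, PySem.Chars.join_singleton,
          List.append_nil]
        rw [pvJoin_cons]
        by_cases hq : q = 0 <;> simp [hq, List.append_assoc, Function.comp_def]
      · -- rest nonempty: the first chunk is full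
        have hlen : (ws.take k).length = k := by
          have : k ≤ ws.length := by
            by_contra hcon
            exact hrestne (List.drop_eq_nil_of_le (by omega))
          simp [this]
        have hidx : (q : Int) * npr + 1 + ((ws.take k).length : Int)
            = ((q + 1 : Nat) : Int) * npr := by
          rw [hlen]; push_cast; nlinarith [hknpr]
        rw [hidx]
        rw [ih (ws.drop k) (by
          simp only [List.length_cons] at hl
          simp only [List.length_drop]
          omega) (q + 1)]
        have hchunks : pvChunks k (w :: ws) = (w :: ws.take k) :: pvChunks k (ws.drop k) := by
          rw [pvChunks]
        rw [hchunks]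
        have hprefne : ¬ ((q + 1 = 0) ∨ ws.drop k = []) := by
          simp [hrestne]
        rw [if_neg hprefne]
        cases hch : pvChunks k (ws.drop k) with
        | nil =>
          exfalso
          cases hdk : ws.drop k with
          | nil => exact hrestne hdk
          | cons a as => rw [hdk, pvChunks] at hch; simp at hch
        | cons r rr =>
          simp only [List.map_cons, PySem.Chars.join_cons_cons]
          rw [pvJoin_cons]
          by_cases hq : q = 0 <;>
            · simp only [hq, List.append_assoc, List.map_take, List.map_map, Function.comp_def]
              simp [List.append_assoc]
              rw [pvJoin_cons]
              simp [List.map_take, List.map_map, Function.comp_def, List.append_assoc]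

theorem pvTake_min (l : List String) (m : Nat) : l.take (min l.length m) = l.take m := by
  rcases le_total l.length m with h | h
  · simp [Nat.min_eq_left h, List.take_of_length_le, List.take_of_length_le (le_trans h (le_refl m))]
  · simp [Nat.min_eq_right h]

theorem pvDrop_min (l : List String) (m : Nat) : l.drop (min l.length m) = l.drop m := by
  rcases le_total l.length m with h | h
  · simp [Nat.min_eq_left h, List.drop_eq_nil_of_le, List.drop_eq_nil_of_le h]
  · simp [Nat.min_eq_right h]

theorem pvALoop_eq (words : List String) (npr wj : Int) (disp : Bool) (hnpr : 1 ≤ npr) :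
    ∀ (fuel ins : Nat) (wr dwr : List (List (List Char))),
    words.length ≤ ins + fuel →
    pvALoop words (words.length : Int) npr wj disp fuel (ins : Int) wr dwr =
      (wr ++ (pvChunks (npr.toNat - 1) (words.drop ins)).map (List.map (pvTokQ wj)),
       dwr ++ (if disp then (pvChunks (npr.toNat - 1) (words.drop ins)).map (List.map (pvTokD wj)) else [])) := by
  intro fuel
  induction fuel with
  | zero =>
    intro ins wr dwr hle
    have hdrop : words.drop ins = [] := List.drop_eq_nil_of_le (by omega)
    simp [pvALoop, hdrop, pvChunks]
  | succ fuel ih =>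
    intro ins wr dwr hle
    by_cases hlt : (ins : Int) < (words.length : Int)
    · have hltn : ins < words.length := by exact_mod_cast hlt
      rw [pvALoop, if_pos hlt]
      dsimp only
      set k := min ((words.length : Int) - (ins : Int)) npr with hkdef
      have hk1 : 1 ≤ k := by
        rcases le_total ((words.length : Int) - (ins : Int)) npr with h | h
        · rw [hkdef, min_eq_left h]; omega
        · rw [hkdef, min_eq_right h]; omega
      have hrlen : (words.drop ins).length = words.length - ins := by simp
      have hkt : k.toNat = min (words.drop ins).length npr.toNat := by
        rw [hkdef, hrlen]; omega
      have hslice : PySem.List.slice words (some (ins : Int)) (some ((ins : Int) + k))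
          = List.take k.toNat (List.drop ins words) := by
        rw [PySem.List.slice_toNat words (by omega) (by omega)]
        have h1 : ((ins : Int)).toNat = ins := by omega
        have h2 : ((ins : Int) + k).toNat - ((ins : Int)).toNat = k.toNat := by omega
        rw [h2, h1]
      have hcast : (ins : Int) + k = ((ins + k.toNat : Nat) : Int) := by push_cast; omega
      rw [hslice, hcast, ih (ins + k.toNat) _ _ (by omega)]
      have htake : List.take k.toNat (List.drop ins words)
          = List.take npr.toNat (List.drop ins words) := by
        rw [hkt]; exact pvTake_min _ _
      have hdrop2 : words.drop (ins + k.toNat) = List.drop npr.toNat (List.drop ins words) := by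
        rw [← pvDrop_min (List.drop ins words) npr.toNat, ← hkt, List.drop_drop]
      have hrne : words.drop ins ≠ [] := by
        intro hcon
        have := List.drop_eq_nil_iff.mp hcon
        omega
      obtain ⟨w, ws, hws⟩ := List.exists_cons_of_ne_nil hrne
      have hnprt : npr.toNat = (npr.toNat - 1) + 1 := by omega
      have hch : pvChunks (npr.toNat - 1) (words.drop ins)
          = (List.take npr.toNat (words.drop ins))
              :: pvChunks (npr.toNat - 1) (List.drop npr.toNat (words.drop ins)) := by
        rw [hws, pvChunks]
        congr 1
        · rw [hnprt]; simp
        · rw [hnprt]; simp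
      cases disp <;> simp [hdrop2, hch, htake]
    · have hdrop : words.drop ins = [] := List.drop_eq_nil_of_le (by omega)
      rw [pvALoop, if_neg hlt]
      simp [hdrop, pvChunks]

theorem words_to_formatted_2d_spec : Claim_equal_words_to_formatted_2d := by
  intro words npr wj display _ hpre
  unfold Spec_words_to_formatted_2d
  by_cases hnpr : 1 ≤ npr
  · -- the general case
    unfold words_to_formatted_2d words_to_formatted_2d_alt
    set disp := display == some true with hdisp
    have hA := pvALoop_eq words npr wj disp hnpr words.length 0 [] [] (by omega)
    have hB := pvB_fold npr wj disp words 0 [] []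
    have hzero : ((0 : Nat) : Int) = 0 := by simp
    rw [hzero] at hA
    simp only [List.drop_zero, List.nil_append] at hA
    simp only [hA, hB, List.nil_append]
    have hq0 : (0 : Int) = ((0 : Nat) : Int) * npr := by simp
    rw [hq0, pvGo_eq_join npr hnpr (pvTokQ wj) (",\n".toList) (", ".toList) words.length words le_rfl 0,
      pvGo_eq_join npr hnpr (pvTokD wj) ("\n".toList) ("      ".toList) words.length words le_rfl 0]
    simp only [List.map_map, Function.comp_def]
    cases disp <;> simp [Function.comp_def]
  · -- Pre_ then forces words = []
    have hwords : words = [] := by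
      rcases hpre with h | h
      · exact h
      · exact absurd h hnpr
    subst hwords
    simp [words_to_formatted_2d, words_to_formatted_2d_alt, pvALoop,
      PySem.List.enumerate_nil, PySem.Chars.join_nil]
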